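-- pv_equiv track=rewrite | github.com/bio-ontology-research-group/hapli | hapli/external/csq.py | _decode_bitmask
-- ===== SOURCE A (Python) =====
-- def _decode_bitmask(mask: int, n_entries: int) -> dict[int, set[int]]:
--     """Return {bcsq_index_1based: {haplotype_idx_1based, ...}} from a FORMAT/BCSQ bitmask."""
--     out: dict[int, set[int]] = {}
--     for k in range(n_entries):
--         for hap in (1, 2):
--             bit = 2 * k + (hap - 1)
--             if mask & (1 << bit):
--                 out.setdefault(k + 1, set()).add(hap)
--     return out
-- ===== SOURCE B (Python) =====
-- def _decode_bitmask(mask: int, n_entries: int) -> dict[int, set[int]]: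
--     """Return {bcsq_index_1based: {haplotype_idx_1based, ...}} from a FORMAT/BCSQ bitmask."""
--     out: dict[int, set[int]] = {}
--     m = mask & ((1 << (2 * n_entries)) - 1) if n_entries > 0 else 0
--     bit = 0
--     while m:
--         if m & 1:
--             k, hap_minus = divmod(bit, 2)
--             out.setdefault(k + 1, set()).add(hap_minus + 1)
--         m >>= 1
--         bit += 1
--     return out
-- ===== Notes on version B (the rewrite author's own statement) =====
-- stated objective: faster
-- what changed: A scans every bit position with a nested loop over all n_entries entries and both haplotypes; B masks the bitmask to its low 2*n_entries bits once and then makes a single data-driven pass over the mask itself, shifting it right until it is exhausted and recovering (entry, haplotype) from each set bit's position via divmod, so the loop stops at the highest populated bit instead of running to n_entries.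
import Mathlib
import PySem

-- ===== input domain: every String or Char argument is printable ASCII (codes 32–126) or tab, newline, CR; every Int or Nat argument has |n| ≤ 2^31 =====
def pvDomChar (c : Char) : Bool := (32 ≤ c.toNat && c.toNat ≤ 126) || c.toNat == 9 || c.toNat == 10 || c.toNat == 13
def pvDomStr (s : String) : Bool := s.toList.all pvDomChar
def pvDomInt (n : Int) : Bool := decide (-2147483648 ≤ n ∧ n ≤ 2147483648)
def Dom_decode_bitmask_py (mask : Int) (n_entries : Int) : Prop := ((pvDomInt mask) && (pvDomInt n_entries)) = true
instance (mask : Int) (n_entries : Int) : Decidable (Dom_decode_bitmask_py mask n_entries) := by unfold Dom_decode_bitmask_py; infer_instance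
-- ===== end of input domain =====

-- B replaces A's nested scan over every (entry, haplotype) bit position by one data-driven
-- pass over the masked bitmask itself, shifting it until it is exhausted (objective: faster
-- on inputs whose n_entries far exceeds the populated bits).

-- ===== PORT A =====
-- Literal port of A: out.setdefault(k+1, set()).add(hap) is Dict.modify with default ∅
-- (insert-empty-then-add-in-place ≡ modify with default ∅ and function add).
def decode_bitmask_py (mask : Int) (n_entries : Int) : List (Int × List Int) :=
  ((PySem.List.pyRange 0 n_entries 1).foldl (fun out k =>
      ([1, 2] : List Int).foldl (fun out hap =>
        let bit : Int := 2 * k + (hap - 1)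
        if PySem.Int.band mask ((1 : Int) <<< bit.toNat) ≠ 0 then
          PySem.Dict.modify out (k + 1) PySem.Set.empty (fun s => PySem.Set.add s hap)
        else out) out)
    PySem.Dict.empty).items

-- ===== PORT B =====
-- The Python loop variable m starts as mask & (2^(2*n_entries)-1) ≥ 0 and only shifts right,
-- so it is nonnegative throughout; the port carries it as the equal-valued Nat.
def pvBitsLoop (m : Nat) (bit : Nat) (out : PySem.Dict Int (PySem.Set Int)) :
    PySem.Dict Int (PySem.Set Int) :=
  if m = 0 then out
  else
    let out' :=
      if m &&& 1 ≠ 0 then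
        let k : Int := PySem.Int.floordiv (bit : Int) 2
        let hap_minus : Int := PySem.Int.mod (bit : Int) 2
        PySem.Dict.modify out (k + 1) PySem.Set.empty (fun s => PySem.Set.add s (hap_minus + 1))
      else out
    pvBitsLoop (m >>> 1) (bit + 1) out'
  termination_by m
  decreasing_by simp [Nat.shiftRight_one]; omega

def decode_bitmask_py_alt (mask : Int) (n_entries : Int) : List (Int × List Int) :=
  let m : Int :=
    if n_entries > 0 then PySem.Int.band mask (((1 : Int) <<< (2 * n_entries).toNat) - 1) else 0
  (pvBitsLoop m.toNat 0 PySem.Dict.empty).items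

-- ===== PRECONDITION & SPEC =====
def Spec_decode_bitmask_py (mask : Int) (n_entries : Int) (out : List (Int × List Int)) : Prop := out = decode_bitmask_py_alt mask n_entries
instance (mask : Int) (n_entries : Int) (out : List (Int × List Int)) : Decidable (Spec_decode_bitmask_py mask n_entries out) := by unfold Spec_decode_bitmask_py; infer_instance

-- ===== CLAIM (what is proved, stated in full; the proofs are below) =====
def Claim_equal_decode_bitmask_py : Prop := ∀ (mask : Int) (n_entries : Int), Dom_decode_bitmask_py mask n_entries → Spec_decode_bitmask_py mask n_entries (decode_bitmask_py mask n_entries)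

-- ===== LEMMAS AND PROOFS =====

-- the common per-bit dictionary update both programs perform for a set bit b
def pvUpd (out : PySem.Dict Int (PySem.Set Int)) (b : Nat) : PySem.Dict Int (PySem.Set Int) :=
  PySem.Dict.modify out (((b / 2 : Nat) : Int) + 1) PySem.Set.empty
    (fun s => PySem.Set.add s (((b % 2 : Nat) : Int) + 1))

-- A's test of bit b of mask
def pvP (mask : Int) (b : Nat) : Bool := decide (PySem.Int.band mask ((1 : Int) <<< b) ≠ 0)

-- the ascending list of set-bit positions of m
def pvBits (m : Nat) : List Nat :=
  if m = 0 then [] else (if m &&& 1 ≠ 0 then [0] else []) ++ (pvBits (m >>> 1)).map (· + 1)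
  termination_by m
  decreasing_by simp [Nat.shiftRight_one]; omega

lemma pvBitsLoop_eq_foldl (m : Nat) : ∀ (bit : Nat) (out : PySem.Dict Int (PySem.Set Int)),
    pvBitsLoop m bit out = (pvBits m).foldl (fun o b => pvUpd o (b + bit)) out := by
  induction m using Nat.strong_induction_on with
  | _ m ih =>
    intro bit out
    rw [pvBitsLoop, pvBits]
    by_cases h : m = 0
    · simp [h]
    · have hlt : m >>> 1 < m := by simp [Nat.shiftRight_one]; omega
      simp only [h, ite_false]
      rw [ih _ hlt]
      rw [List.foldl_append, List.foldl_map]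
      have hfun : (fun (o : PySem.Dict Int (PySem.Set Int)) (b : Nat) => pvUpd o (b + 1 + bit))
          = fun o b => pvUpd o (b + (bit + 1)) := by
        funext o b; congr 1; omega
      rw [hfun]
      congr 1
      by_cases hb : m % 2 = 1 <;>
        simp [hb, pvUpd]

lemma pvBits_eq_filter : ∀ (L m : Nat), m < 2 ^ L →
    pvBits m = (List.range L).filter (fun b => m.testBit b) := by
  intro L
  induction L with
  | zero =>
    intro m hm
    have : m = 0 := by simpa using hm
    subst this
    rw [pvBits]; simp
  | succ L ih =>
    intro m hm
    by_cases h : m = 0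
    · subst h
      rw [pvBits]; simp
    · rw [pvBits]
      simp only [h, ite_false]
      have h2 : m >>> 1 = m / 2 := Nat.shiftRight_one m
      have hlt : m / 2 < 2 ^ L := by
        have := Nat.pow_succ 2 L
        omega
      rw [h2, ih _ hlt]
      rw [List.range_succ_eq_map, List.filter_cons, List.filter_map]
      have hsucc : ((fun b => m.testBit b) ∘ Nat.succ) = fun b => (m / 2).testBit b := by
        funext b
        simp [Function.comp, Nat.testBit_succ]
      rw [hsucc]
      by_cases hb : m % 2 = 1 <;>
        simp [hb, Nat.and_one_is_mod]

lemma pvAndMod (m n : Nat) : (m &&& n) % 2 = m % 2 * (n % 2) := by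
  have h1 := Nat.testBit_and m n 0
  rw [Nat.testBit_zero, Nat.testBit_zero, Nat.testBit_zero] at h1
  rcases Nat.mod_two_eq_zero_or_one (m &&& n) with k | k <;>
  rcases Nat.mod_two_eq_zero_or_one m with h | h <;>
  rcases Nat.mod_two_eq_zero_or_one n with g | g <;> simp [h, g, k] at h1 ⊢

lemma pvSub_and_testBit : ∀ (a x b : Nat),
    (a - (a &&& x)).testBit b = (a.testBit b && ! x.testBit b) := by
  intro a
  induction a using Nat.strong_induction_on with
  | _ a ih =>
    intro x b
    by_cases ha : a = 0
    · subst ha; simp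
    · have hd : (a &&& x) / 2 = a / 2 &&& x / 2 := Nat.and_div_two
      have hm := pvAndMod a x
      have hle2 : a / 2 &&& x / 2 ≤ a / 2 := Nat.and_le_left
      have hmle : a % 2 * (x % 2) ≤ a % 2 := by
        rcases Nat.mod_two_eq_zero_or_one x with g | g <;> simp [g]
      have key : a - (a &&& x) = 2 * (a / 2 - (a / 2 &&& x / 2)) + (a % 2 - a % 2 * (x % 2)) := by
        omega
      cases b with
      | zero =>
        rw [key, Nat.testBit_zero, Nat.testBit_zero, Nat.testBit_zero]
        rcases Nat.mod_two_eq_zero_or_one a with h | h <;>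
        rcases Nat.mod_two_eq_zero_or_one x with g | g <;> simp [h, g]
      | succ b =>
        rw [key, Nat.testBit_succ, Nat.testBit_succ, Nat.testBit_succ]
        have hdiv : (2 * (a / 2 - (a / 2 &&& x / 2)) + (a % 2 - a % 2 * (x % 2))) / 2
            = a / 2 - (a / 2 &&& x / 2) := by omega
        rw [hdiv]
        exact ih (a / 2) (by omega) (x / 2) b

lemma pvShift (L : Nat) : ((1 : Int) <<< L) = ((2 ^ L : Nat) : Int) := by
  simp [Int.shiftLeft_eq]

lemma pvOnesToNat (L : Nat) : (((1 : Int) <<< L) - 1).toNat = 2 ^ L - 1 := by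
  rw [pvShift]
  have : (1:Nat) ≤ 2 ^ L := Nat.one_le_two_pow
  omega

lemma pvOnesNonneg (L : Nat) : (0 : Int) ≤ ((1 : Int) <<< L) - 1 := by
  rw [pvShift]
  have : (1:Nat) ≤ 2 ^ L := Nat.one_le_two_pow
  omega

lemma pvTestBit (mask : Int) (L b : Nat) (hb : b < L) :
    (PySem.Int.band mask (((1 : Int) <<< L) - 1)).toNat.testBit b = pvP mask b := by
  unfold pvP
  have h1 : ((1:Int) <<< b) = ((2^b : Nat) : Int) := pvShift b
  have h2 : (0:Int) ≤ (1:Int) <<< b := by rw [h1]; positivity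
  by_cases hm : 0 ≤ mask
  · rw [PySem.Int.band, PySem.Int.band]
    simp only [hm, pvOnesNonneg L, if_pos, h2]
    rw [pvOnesToNat, h1]
    have h3 : ((2^b : Nat) : Int).toNat = 2^b := by omega
    rw [h3, Int.toNat_natCast, Nat.testBit_and, Nat.testBit_two_pow_sub_one,
        Nat.and_two_pow]
    by_cases ht : mask.toNat.testBit b <;> simp [ht, hb]
  · have hm' : ¬ (0:Int) ≤ mask := hm
    rw [PySem.Int.band, PySem.Int.band]
    simp only [hm', if_false, pvOnesNonneg L, if_pos, h2]
    rw [pvOnesToNat, h1, Int.toNat_natCast]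
    set x := (-mask - 1).toNat with hx
    rw [pvSub_and_testBit, Nat.testBit_two_pow_sub_one]
    have h3 : ((2^b : Nat) : Int).toNat = 2^b := by omega
    rw [h3, Nat.and_comm, Nat.and_two_pow]
    by_cases h : x.testBit b <;> simp [h, hb]

lemma pvBound (mask : Int) (L : Nat) :
    (PySem.Int.band mask (((1 : Int) <<< L) - 1)).toNat < 2 ^ L := by
  have h1 : (1:Nat) ≤ 2 ^ L := Nat.one_le_two_pow
  by_cases hm : 0 ≤ mask
  · rw [PySem.Int.band]
    simp only [hm, pvOnesNonneg L, if_pos]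
    rw [pvOnesToNat, Int.toNat_natCast]
    have := Nat.and_le_right (n := mask.toNat) (m := 2 ^ L - 1)
    omega
  · have hm' : ¬ (0:Int) ≤ mask := hm
    rw [PySem.Int.band]
    simp only [hm', if_false, pvOnesNonneg L, if_pos]
    rw [pvOnesToNat, Int.toNat_natCast]
    omega

lemma pvBodyA (mask : Int) (j : Nat) (d : PySem.Dict Int (PySem.Set Int)) :
    ([1, 2] : List Int).foldl (fun out hap =>
        let bit : Int := 2 * (j : Int) + (hap - 1)
        if PySem.Int.band mask ((1 : Int) <<< bit.toNat) ≠ 0 then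
          PySem.Dict.modify out ((j : Int) + 1) PySem.Set.empty (fun s => PySem.Set.add s hap)
        else out) d
    = (fun o b => if pvP mask b then pvUpd o b else o)
        ((fun o b => if pvP mask b then pvUpd o b else o) d (2 * j)) (2 * j + 1) := by
  simp only [List.foldl_cons, List.foldl_nil, pvP, pvUpd]
  have e1 : (2 * (j:Int) + (1 - 1)).toNat = 2 * j := by omega
  have e2 : (2 * (j:Int) + (2 - 1)).toNat = 2 * j + 1 := by omega
  have d1 : (2 * j) / 2 = j := by omega
  have m1 : (2 * j) % 2 = 0 := by omega
  have d2 : (2 * j + 1) / 2 = j := by omega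
  have m2 : (2 * j + 1) % 2 = 1 := by omega
  rw [e1, e2, d1, m1, d2, m2]
  norm_num

lemma pvA_flatten (mask : Int) : ∀ (N : Nat) (d : PySem.Dict Int (PySem.Set Int)),
    ((List.range N).map (fun (k : Nat) => (k : Int))).foldl (fun out k =>
      ([1, 2] : List Int).foldl (fun out hap =>
        let bit : Int := 2 * k + (hap - 1)
        if PySem.Int.band mask ((1 : Int) <<< bit.toNat) ≠ 0 then
          PySem.Dict.modify out (k + 1) PySem.Set.empty (fun s => PySem.Set.add s hap)
        else out) out) d
    = (List.range (2 * N)).foldl (fun o b => if pvP mask b then pvUpd o b else o) d := by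
  intro N
  induction N with
  | zero => intro d; simp
  | succ N ih =>
    intro d
    have h2 : 2 * (N + 1) = (2 * N + 1) + 1 := by omega
    rw [List.range_succ, List.map_append, List.foldl_append, ih, h2, List.range_succ,
        List.range_succ, List.foldl_append, List.foldl_append]
    have hb := pvBodyA mask N
      ((List.range (2 * N)).foldl (fun o b => if pvP mask b then pvUpd o b else o) d)
    simp only [List.map_cons, List.map_nil, List.foldl_cons, List.foldl_nil]
    simpa using hb

-- ===== VERDICT (by name: the statement is the Claim_ definition above) =====
theorem decode_bitmask_py_spec : Claim_equal_decode_bitmask_py := by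
  intro mask n_entries _
  unfold Spec_decode_bitmask_py decode_bitmask_py decode_bitmask_py_alt
  by_cases hn : n_entries > 0
  · simp only [hn, if_pos]
    have hN : n_entries = ((n_entries.toNat : Nat) : Int) := (Int.toNat_of_nonneg (by omega)).symm
    set N := n_entries.toNat with hNdef
    have hL : (2 * n_entries).toNat = 2 * N := by omega
    rw [hL]
    have hrange : PySem.List.pyRange 0 n_entries 1 = (List.range N).map (fun (k : Nat) => (k : Int)) := by
      rw [hN]
      exact PySem.List.pyRange_zero_natCast N
    rw [hrange, pvA_flatten]
    set mN := (PySem.Int.band mask (((1 : Int) <<< (2 * N)) - 1)).toNat with hmN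
    have hfilter : (List.range (2 * N)).filter (pvP mask)
        = (List.range (2 * N)).filter (fun b => mN.testBit b) := by
      apply List.filter_congr
      intro b hbmem
      rw [pvTestBit mask (2 * N) b (List.mem_range.mp hbmem)]
    rw [← List.foldl_filter, hfilter,
        ← pvBits_eq_filter (2 * N) mN (pvBound mask (2 * N)), pvBitsLoop_eq_foldl]
    simp
  · simp only [hn, ite_false]
    have hr : PySem.List.pyRange 0 n_entries 1 = [] := by
      rw [PySem.List.pyRange]
      simp [show ¬ (0:Int) < n_entries by omega]
    rw [hr]
    simp [pvBitsLoop]
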